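-- pv_equiv track=rewrite | github.com/loukaalet/S1-Analyse-de-donnees | Séance 6/src/main.py | classementPays
-- ===== SOURCE A (Python) =====
-- def classementPays(ordre1, ordre2):
--     classement = []
--     if len(ordre1) <= len(ordre2):
--         for i in range(len(ordre2)):
--             for j in range(len(ordre1)):
--                 if ordre2[i][1] == ordre1[j][1]:
--                     classement.append([ordre1[j][0], ordre2[i][0], ordre1[j][1]])
--     else:
--         for i in range(len(ordre1)):
--             for j in range(len(ordre2)):
--                 if ordre1[i][1] == ordre2[j][1]:
--                     classement.append([ordre1[i][0], ordre2[j][0], ordre1[i][1]])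
--     return classement
-- ===== SOURCE B (Python) =====
-- def classementPays(ordre1, ordre2):
--     # Hash join: index the smaller-role list by key (row[1]) once, then a single
--     # scan of the other list; O(n+m) instead of A's O(n*m) nested scans.
--     classement = []
--     if len(ordre1) <= len(ordre2):
--         index = {}
--         for row in ordre1:
--             index.setdefault(row[1], []).append(row[0])
--         for row in ordre2:
--             for v in index.get(row[1], []):
--                 classement.append([v, row[0], row[1]])
--     else:
--         index = {}
--         for row in ordre2:
--             index.setdefault(row[1], []).append(row[0])
--         for row in ordre1:
--             for v in index.get(row[1], []):
--                 classement.append([row[0], v, row[1]])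
--     return classement
-- ===== Notes on version B (the rewrite author's own statement) =====
-- stated objective: faster
-- what changed: Replaced A's nested O(n*m) scan with a hash join: the smaller-role list is indexed once into a dict mapping key (row[1]) to the list of its row[0] values, then a single scan of the other list emits the matches.
-- outside the precondition, e.g. on classementPays([], [[1]]): A returns [], B raises IndexError; on classementPays([[1]], []): A returns [], B raises IndexError
import Mathlib
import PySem

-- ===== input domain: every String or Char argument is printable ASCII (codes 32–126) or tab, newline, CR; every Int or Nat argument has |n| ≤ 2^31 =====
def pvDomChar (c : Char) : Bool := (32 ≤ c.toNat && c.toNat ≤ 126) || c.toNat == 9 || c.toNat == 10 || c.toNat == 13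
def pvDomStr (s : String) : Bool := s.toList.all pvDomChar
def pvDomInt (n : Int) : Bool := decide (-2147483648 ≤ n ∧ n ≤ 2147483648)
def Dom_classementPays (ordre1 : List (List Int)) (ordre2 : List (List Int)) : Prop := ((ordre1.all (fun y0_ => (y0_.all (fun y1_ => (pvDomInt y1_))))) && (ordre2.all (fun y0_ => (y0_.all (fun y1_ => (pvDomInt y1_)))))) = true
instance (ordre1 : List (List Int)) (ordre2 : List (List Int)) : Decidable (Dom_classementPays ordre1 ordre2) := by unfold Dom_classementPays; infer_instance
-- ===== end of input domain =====

-- Hash join (dict of lists, built once) replaces A's nested O(n*m) scans; return value proved equal on Pre_.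


-- ===== PORT A =====
-- literal transliteration of A: the two range(len(..)) loops become folds over the
-- same rows; row[1] / row[0] are PySem.List.pyGetD (exact under Pre_, which keeps every index in range)
def classementPays (ordre1 : List (List Int)) (ordre2 : List (List Int)) : List (List Int) :=
  if PySem.List.len ordre1 ≤ PySem.List.len ordre2 then
    ordre2.foldl (fun acc ri =>
      ordre1.foldl (fun acc rj =>
        if PySem.List.pyGetD ri 1 0 == PySem.List.pyGetD rj 1 0 then
          acc ++ [[PySem.List.pyGetD rj 0 0, PySem.List.pyGetD ri 0 0, PySem.List.pyGetD rj 1 0]]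
        else acc) acc) []
  else
    ordre1.foldl (fun acc ri =>
      ordre2.foldl (fun acc rj =>
        if PySem.List.pyGetD ri 1 0 == PySem.List.pyGetD rj 1 0 then
          acc ++ [[PySem.List.pyGetD ri 0 0, PySem.List.pyGetD rj 0 0, PySem.List.pyGetD ri 1 0]]
        else acc) acc) []

-- ===== PORT B =====
-- Source B's index-building loop: index.setdefault(row[1], []).append(row[0]),
-- i.e. index[row[1]] = index.get(row[1], []) + [row[0]]  =  Dict.modify
def pvIndex (rows : List (List Int)) : PySem.Dict Int (List Int) :=
  rows.foldl
    (fun d r => d.modify (PySem.List.pyGetD r 1 0) [] (· ++ [PySem.List.pyGetD r 0 0]))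
    PySem.Dict.empty

def classementPays_alt (ordre1 : List (List Int)) (ordre2 : List (List Int)) : List (List Int) :=
  if PySem.List.len ordre1 ≤ PySem.List.len ordre2 then
    let idx := pvIndex ordre1
    ordre2.foldl (fun acc r =>
      acc ++ (idx.getD (PySem.List.pyGetD r 1 0) []).map
        (fun v => [v, PySem.List.pyGetD r 0 0, PySem.List.pyGetD r 1 0])) []
  else
    let idx := pvIndex ordre2
    ordre1.foldl (fun acc r =>
      acc ++ (idx.getD (PySem.List.pyGetD r 1 0) []).map
        (fun v => [PySem.List.pyGetD r 0 0, v, PySem.List.pyGetD r 1 0])) []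

-- ===== PRECONDITION & SPEC =====
-- Pre_ excludes inputs where some row has fewer than 2 elements: whenever both lists are
-- nonempty A raises IndexError on them, and on the remaining degenerate cases (one list
-- empty, where A vacuously returns []) B's index build/probe still reads row[1] and raises.
def Pre_classementPays (ordre1 : List (List Int)) (ordre2 : List (List Int)) : Prop :=
  (∀ r ∈ ordre1, 2 ≤ r.length) ∧ (∀ r ∈ ordre2, 2 ≤ r.length)
instance (ordre1 : List (List Int)) (ordre2 : List (List Int)) : Decidable (Pre_classementPays ordre1 ordre2) := by unfold Pre_classementPays; infer_instance

def pvWitness_classementPays : List (List Int) × List (List Int) :=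
  ([[1, 10], [2, 20]], [[3, 10], [4, 30]])

def Spec_classementPays (ordre1 : List (List Int)) (ordre2 : List (List Int)) (out : List (List Int)) : Prop := out = classementPays_alt ordre1 ordre2
instance (ordre1 : List (List Int)) (ordre2 : List (List Int)) (out : List (List Int)) : Decidable (Spec_classementPays ordre1 ordre2 out) := by unfold Spec_classementPays; infer_instance

-- ===== CLAIM (what is proved, stated in full; the proofs are below) =====
def Claim_equal_classementPays : Prop := ∀ (ordre1 : List (List Int)) (ordre2 : List (List Int)), Dom_classementPays ordre1 ordre2 → Pre_classementPays ordre1 ordre2 → Spec_classementPays ordre1 ordre2 (classementPays ordre1 ordre2)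

-- ===== LEMMAS AND PROOFS =====

-- the index lookup is exactly "first components of the rows with this key, in order"
lemma pvIndex_getD (rows : List (List Int)) (k : Int) :
    (pvIndex rows).getD k []
      = (rows.filter (fun r => PySem.List.pyGetD r 1 0 == k)).map
          (fun r => PySem.List.pyGetD r 0 0) := by
  have h : pvIndex rows
      = ((rows.map (fun r => (PySem.List.pyGetD r 1 0, PySem.List.pyGetD r 0 0))).foldl
          (fun d p => d.modify p.1 [] (· ++ [p.2])) PySem.Dict.empty) := by
    rw [List.foldl_map]; rfl
  rw [h, PySem.Dict.getD_foldl_modify_append, PySem.Dict.getD_empty, List.filter_map,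
    List.map_map]
  rfl

-- one branch of the join: A's nested scan over (outer, inner) equals B's indexed scan;
-- mk abstracts the order in which the two first-components and the key are emitted
lemma pv_branch (outer inner : List (List Int)) (mk : Int → Int → Int → Int → List Int) :
    outer.foldl (fun acc ri =>
        inner.foldl (fun acc rj =>
          if PySem.List.pyGetD ri 1 0 == PySem.List.pyGetD rj 1 0 then
            acc ++ [mk (PySem.List.pyGetD rj 0 0) (PySem.List.pyGetD ri 0 0)
                       (PySem.List.pyGetD rj 1 0) (PySem.List.pyGetD ri 1 0)]
          else acc) acc) []
      = outer.foldl (fun acc r =>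
          acc ++ ((pvIndex inner).getD (PySem.List.pyGetD r 1 0) []).map
            (fun v => mk v (PySem.List.pyGetD r 0 0)
                         (PySem.List.pyGetD r 1 0) (PySem.List.pyGetD r 1 0))) [] := by
  apply PySem.List.foldl_congr_mem
  intro acc ri _
  rw [PySem.List.foldl_append_if, pvIndex_getD, List.map_map]
  congr 1
  induction inner with
  | nil => rfl
  | cons r t ih =>
    by_cases h : PySem.List.pyGetD r 1 0 = PySem.List.pyGetD ri 1 0
    · simp [h, ih, Function.comp]
    · simp [h, Ne.symm h, ih]

lemma ports_eq (ordre1 ordre2 : List (List Int)) :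
    classementPays ordre1 ordre2 = classementPays_alt ordre1 ordre2 := by
  unfold classementPays classementPays_alt
  split_ifs with h
  · exact pv_branch ordre2 ordre1 (fun a b kj _ => [a, b, kj])
  · exact pv_branch ordre1 ordre2 (fun a b _ ki => [b, a, ki])

-- ===== VERDICT (by name: the statement is the Claim_ definition above) =====
theorem classementPays_spec : Claim_equal_classementPays := by
  intro ordre1 ordre2 _ _
  exact ports_eq ordre1 ordre2
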